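-- pv_equiv track=rewrite | github.com/JahodaPaul/FIT_CTU | SemanticSegmentation.py | BresenhamLineSample
-- ===== SOURCE A (Python) =====
-- def BresenhamLineSample(arr, k):
--     if k >= len(arr):
--         return arr
--     else:
--         x0 = 0
--         x1 = k - 1
--         y0 = 0
--         y1 = len(arr) - (k + 1)
--
--     dx = x1 - x0
--     dy = abs(y1 - y0)
--     D = 2 * dy - dx
--     y = y0
--     res = []
--     counter = 0
--
--     for x in range(x0, x1 + 1):
--         res.append(arr[counter])
--         counter += 1
--         while D > 0 and (x != x1 or y != y1):
--             y = y + (1 if y1 >= y0 else -1)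
--             counter += 1
--             D = D - 2 * dx
--         D = D + 2 * dy
--     return res
-- ===== SOURCE B (Python) =====
-- def BresenhamLineSample(arr, k):
--     # Closed-form Bresenham: the y-position at column x is the ceiling
--     # of (2*dy*x - dx) / (2*dx) clamped at 0, so each source index is
--     # computed directly instead of stepping an error term.
--     n = len(arr)
--     if k >= n:
--         return arr
--     if k <= 0:
--         return []
--     if k == 1:
--         return [arr[0]]
--     dx = k - 1
--     dy = n - k - 1
--     out = [arr[0]]
--     for x in range(1, k):
--         y = max(0, -((dx - 2 * dy * x) // (2 * dx)))
--         out.append(arr[x + y])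
--     return out
-- ===== Notes on version B (the rewrite author's own statement) =====
-- stated objective: alternative
-- what changed: Replaces the stepped Bresenham error-term loop by a closed-form ceiling-division formula computing each of the k source indices directly (no error variable, no inner while loop).
import Mathlib
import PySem

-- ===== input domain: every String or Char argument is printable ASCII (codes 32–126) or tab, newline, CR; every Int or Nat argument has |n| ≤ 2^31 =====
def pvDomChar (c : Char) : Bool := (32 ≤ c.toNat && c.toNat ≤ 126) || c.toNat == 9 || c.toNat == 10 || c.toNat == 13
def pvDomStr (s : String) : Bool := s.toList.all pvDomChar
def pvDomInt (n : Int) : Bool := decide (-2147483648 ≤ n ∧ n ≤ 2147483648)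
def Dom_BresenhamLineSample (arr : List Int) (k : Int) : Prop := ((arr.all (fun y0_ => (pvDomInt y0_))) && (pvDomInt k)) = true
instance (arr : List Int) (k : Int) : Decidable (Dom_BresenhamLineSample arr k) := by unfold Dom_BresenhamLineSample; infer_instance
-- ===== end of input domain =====

-- B replaces A's stepped Bresenham error loop by a closed-form ceiling-division
-- formula for each of the k source indices (objective: alternative algorithm).

-- ===== PORT A =====
-- the inner 'while D > 0 and (x != x1 or y != y1)' loop; fuel only makes the
-- recursion structurally terminating (it is always ample, proved below)
def pvInnerA (x1 y1 dx : Int) (x : Int) : Nat → Int × Int × Int → Int × Int × Int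
  | 0, s => s
  | fuel + 1, (y, D, counter) =>
    if D > 0 ∧ (x ≠ x1 ∨ y ≠ y1) then
      pvInnerA x1 y1 dx x fuel (y + (if y1 ≥ 0 then 1 else -1), D - 2 * dx, counter + 1)
    else (y, D, counter)

-- one iteration of A's 'for x in range(x0, x1 + 1)' body; state (y, D, res, counter)
def pvStepA (arr : List Int) (x1 y1 dx dy : Int) (fuel : Nat)
    (s : Int × Int × List Int × Int) (x : Int) : Int × Int × List Int × Int :=
  let res := s.2.2.1 ++ [(PySem.List.pyGet? arr s.2.2.2).getD 0]
  let t := pvInnerA x1 y1 dx x fuel (s.1, s.2.1, s.2.2.2 + 1)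
  (t.1, t.2.1 + 2 * dy, res, t.2.2)

def BresenhamLineSample (arr : List Int) (k : Int) : List Int :=
  if k ≥ (arr.length : Int) then arr
  else
    let x0 : Int := 0
    let x1 : Int := k - 1
    let y0 : Int := 0
    let y1 : Int := (arr.length : Int) - (k + 1)
    let dx := x1 - x0
    let dy := |y1 - y0|
    let st := (PySem.List.pyRange x0 (x1 + 1) 1).foldl
      (pvStepA arr x1 y1 dx dy (2 * arr.length + 2)) (y0, 2 * dy - dx, [], 0)
    st.2.2.1

-- ===== PORT B =====
def BresenhamLineSample_alt (arr : List Int) (k : Int) : List Int :=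
  if k ≥ (arr.length : Int) then arr
  else if k ≤ 0 then []
  else if k = 1 then [(PySem.List.pyGet? arr 0).getD 0]
  else
    let dx := k - 1
    let dy := (arr.length : Int) - k - 1
    (PySem.List.pyRange 1 k 1).foldl
      (fun out x =>
        let y := max 0 (-(PySem.Int.floordiv (dx - 2 * dy * x) (2 * dx)))
        out ++ [(PySem.List.pyGet? arr (x + y)).getD 0])
      [(PySem.List.pyGet? arr 0).getD 0]

-- ===== PRECONDITION & SPEC =====
def Spec_BresenhamLineSample (arr : List Int) (k : Int) (out : List Int) : Prop := out = BresenhamLineSample_alt arr k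
instance (arr : List Int) (k : Int) (out : List Int) : Decidable (Spec_BresenhamLineSample arr k out) := by unfold Spec_BresenhamLineSample; infer_instance

-- ===== CLAIM (what is proved, stated in full; the proofs are below) =====
def Claim_equal_BresenhamLineSample : Prop := ∀ (arr : List Int) (k : Int), Dom_BresenhamLineSample arr k → Spec_BresenhamLineSample arr k (BresenhamLineSample arr k)

-- ===== LEMMAS AND PROOFS =====

-- closed-form Bresenham y-position at column x (B's formula, with Y 0 = 0)
def pvY (dx dy : Int) (x : Int) : Int :=
  if x = 0 then 0 else max 0 (-(PySem.Int.floordiv (dx - 2 * dy * x) (2 * dx)))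

-- characterization of pvY as the least nonnegative t with 2*dy*x - dx - 2*dx*t ≤ 0
theorem pvY_char (dx dy x : Int) (hdx : 1 ≤ dx) :
    2 * dy * x - dx - 2 * dx * pvY dx dy x ≤ 0 ∧
    (pvY dx dy x = 0 ∨ 2 * dy * x - dx - 2 * dx * (pvY dx dy x - 1) > 0) ∧
    0 ≤ pvY dx dy x := by
  unfold pvY
  by_cases hx0 : x = 0
  · simp [hx0]; nlinarith
  · simp only [hx0, if_false]
    have hb : (0:Int) < 2 * dx := by linarith
    have hq := (PySem.Int.floordiv_eq_iff_of_pos (a := dx - 2 * dy * x) (b := 2 * dx)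
      (q := PySem.Int.floordiv (dx - 2 * dy * x) (2 * dx)) hb).mp rfl
    set q := PySem.Int.floordiv (dx - 2 * dy * x) (2 * dx) with hqdef
    obtain ⟨h1, h2⟩ := hq
    by_cases h : -q ≤ 0
    · have hmax : max 0 (-q) = 0 := by omega
      rw [hmax]
      refine ⟨by nlinarith, Or.inl rfl, le_refl 0⟩
    · have h : 0 < -q := by omega
      have hmax : max 0 (-q) = -q := by omega
      rw [hmax]
      refine ⟨by nlinarith, Or.inr (by nlinarith), by omega⟩

-- only one value satisfies that characterization
theorem pv_unique_min (P dx a b : Int) (hdx : 1 ≤ dx)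
    (ha1 : P - 2 * dx * a ≤ 0) (ha2 : a = 0 ∨ P - 2 * dx * (a - 1) > 0) (ha3 : 0 ≤ a)
    (hb1 : P - 2 * dx * b ≤ 0) (hb2 : b = 0 ∨ P - 2 * dx * (b - 1) > 0) (hb3 : 0 ≤ b) :
    a = b := by
  by_contra hne
  rcases lt_or_gt_of_ne hne with h | h
  · have hb0 : 1 ≤ b := by omega
    rcases hb2 with hb2 | hb2
    · omega
    · nlinarith
  · have ha0 : 1 ≤ a := by omega
    rcases ha2 with ha2 | ha2
    · omega
    · nlinarith

-- the inner while loop advances y until D ≤ 0 (given x ≠ x1, 0 ≤ y1, enough fuel)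
theorem pvInnerA_spec (x1 y1 dx x : Int) (hx : x ≠ x1) (hy1 : 0 ≤ y1) :
    ∀ (fuel : Nat) (y D c : Int), D ≤ 2 * dx * (fuel : Int) →
    ∃ m : Int, 0 ≤ m ∧ pvInnerA x1 y1 dx x fuel (y, D, c) = (y + m, D - 2 * dx * m, c + m) ∧
      D - 2 * dx * m ≤ 0 ∧ (m = 0 ∨ D - 2 * dx * (m - 1) > 0) := by
  intro fuel
  induction fuel with
  | zero =>
    intro y D c hD
    exact ⟨0, le_refl 0, by simp [pvInnerA], by simpa using hD, Or.inl rfl⟩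
  | succ f ih =>
    intro y D c hD
    by_cases hDpos : D > 0
    · have hcond : D > 0 ∧ (x ≠ x1 ∨ y ≠ y1) := ⟨hDpos, Or.inl hx⟩
      have hstep : (if y1 ≥ 0 then (1:Int) else -1) = 1 := by simp [hy1]
      have hD' : D - 2 * dx ≤ 2 * dx * (f : Int) := by
        push_cast at hD ⊢; nlinarith
      obtain ⟨m, hm0, heq, hle, hpos⟩ := ih (y + 1) (D - 2 * dx) (c + 1) hD'
      refine ⟨m + 1, by omega, ?_, by linarith, Or.inr ?_⟩
      · simp only [pvInnerA, hcond, hstep]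
        rw [heq]
        refine congrArg₂ Prod.mk (by ring) (congrArg₂ Prod.mk (by ring) (by ring))
      · rcases hpos with h | h
        · subst h; simpa using hDpos
        · nlinarith
    · have hcond : ¬ (D > 0 ∧ (x ≠ x1 ∨ y ≠ y1)) := fun h => hDpos h.1
      exact ⟨0, le_refl 0, by simp [pvInnerA, hcond], by linarith, Or.inl rfl⟩

-- fold over l appending [g x] = init ++ l.map g
theorem pv_foldl_append_map (g : Int → Int) :
    ∀ (l : List Int) (init : List Int),
      l.foldl (fun out x => out ++ [g x]) init = init ++ l.map g := by
  intro l
  induction l with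
  | nil => intro init; simp
  | cons a t ih => intro init; simp [List.foldl_cons, ih]

-- loop invariant for A's outer for-loop: state before iteration j
theorem pv_fold_inv (arr : List Int) (dx dy : Int) (fuel : Nat)
    (hdx : 1 ≤ dx) (hdy : 0 ≤ dy) (hfuel : dy ≤ dx * (fuel : Int)) :
    ∀ j : Nat, (j : Int) ≤ dx →
    (PySem.List.pyRange 0 (j : Int) 1).foldl (pvStepA arr dx dy dx dy fuel) (0, 2 * dy - dx, [], 0)
    = (pvY dx dy j, 2 * dy - dx + 2 * dy * j - 2 * dx * pvY dx dy j,
       (PySem.List.pyRange 0 (j : Int) 1).map (fun x => (PySem.List.pyGet? arr (x + pvY dx dy x)).getD 0),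
       (j : Int) + pvY dx dy j) := by
  intro j
  induction j with
  | zero =>
    intro _
    simp [PySem.List.pyRange_one_eq_nil (le_refl (0:Int)), pvY]
  | succ j ih =>
    intro hj1
    have hj1' : ((j:Int) + 1) ≤ dx := by push_cast at hj1; linarith
    have hjdx : (j : Int) < dx := by linarith
    have hrange : PySem.List.pyRange 0 ((j:Int)+1) 1
        = PySem.List.pyRange 0 (j:Int) 1 ++ [(j:Int)] := by
      exact PySem.List.pyRange_one_succ_right (by positivity)
    push_cast
    rw [hrange, List.foldl_append, List.map_append, ih (by linarith)]
    -- one step of pvStepA at x = j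
    have hcharj := pvY_char dx dy j hdx
    have hDentry : 2 * dy - dx + 2 * dy * j - 2 * dx * pvY dx dy j ≤ 2 * dx * (fuel : Int) := by
      nlinarith [hcharj.1]
    obtain ⟨m, hm0, heq, hle, hpos⟩ := pvInnerA_spec dx dy dx (j:Int) (by exact ne_of_lt hjdx) hdy
      fuel (pvY dx dy j) (2 * dy - dx + 2 * dy * j - 2 * dx * pvY dx dy j)
      ((j:Int) + pvY dx dy j + 1) hDentry
    have hY1 : pvY dx dy j + m = pvY dx dy ((j:Int)+1) := by
      have hchar' := pvY_char dx dy ((j:Int)+1) hdx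
      refine pv_unique_min (2 * dy * ((j:Int)+1) - dx) dx _ _ hdx ?_ ?_ (by omega) ?_ ?_ hchar'.2.2
      · nlinarith [hle]
      · rcases eq_or_lt_of_le hm0 with hm | hm
        · rcases hcharj.2.1 with h0 | hgt
          · exact Or.inl (by omega)
          · exact Or.inr (by nlinarith)
        · rcases hpos with h0 | hgt
          · omega
          · exact Or.inr (by nlinarith)
      · nlinarith [hchar'.1]
      · rcases hchar'.2.1 with h | h
        · exact Or.inl h
        · exact Or.inr (by nlinarith)
    simp only [List.foldl_cons, List.foldl_nil, pvStepA, heq]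
    refine congrArg₂ Prod.mk (by linarith [hY1]) (congrArg₂ Prod.mk (by nlinarith [hY1]) (congrArg₂ Prod.mk rfl (by linarith [hY1])))

-- ===== VERDICT (by name: the statement is the Claim_ definition above) =====
theorem BresenhamLineSample_spec : Claim_equal_BresenhamLineSample := by
  intro arr k _
  unfold Spec_BresenhamLineSample BresenhamLineSample BresenhamLineSample_alt
  by_cases hkn : k ≥ (arr.length : Int)
  · simp [hkn]
  · simp only [hkn, if_false]
    rw [not_le] at hkn
    by_cases hk0 : k ≤ 0
    · simp [hk0]
    · rw [not_le] at hk0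
      by_cases hk1 : k = 1
      · subst hk1
        have h1 : PySem.List.pyRange 0 1 1 = [(0:Int)] := by
          have h := PySem.List.pyRange_one_singleton (a := (0:Int))
          norm_num at h
          exact h
        simp [h1, pvStepA]
      · -- main case: 2 ≤ k < len(arr)
        have hk2 : 2 ≤ k := by omega
        have hif : ¬ k ≤ 0 := by omega
        simp only [hif, if_false, hk1, if_false]
        set n : Int := (arr.length : Int) with hn
        have hn0 : 0 ≤ n := by positivity
        set dx : Int := k - 1 with hdxd
        set dy : Int := n - k - 1 with hdyd
        have hdx : 1 ≤ dx := by omega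
        have hdy : 0 ≤ dy := by omega
        have hrw : n - (k + 1) = dy := by omega
        have hfuel : dy ≤ dx * ((2 * arr.length + 2 : Nat) : Int) := by
          push_cast
          nlinarith
        have hsplit : PySem.List.pyRange 0 (k - 1 + 1) 1
            = PySem.List.pyRange 0 dx 1 ++ [dx] := by
          have : k - 1 + 1 = dx + 1 := by omega
          rw [this]
          exact PySem.List.pyRange_one_succ_right (by omega)
        have hdxnat : ((dx.toNat : Nat) : Int) = dx := Int.toNat_of_nonneg (by omega)
        have hinv := pv_fold_inv arr dx dy (2 * arr.length + 2) hdx hdy hfuel dx.toNat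
          (by rw [hdxnat])
        rw [hdxnat] at hinv
        simp only [sub_zero]
        rw [hrw, abs_of_nonneg hdy, hsplit, List.foldl_append, hinv]
        simp only [List.foldl_cons, List.foldl_nil, pvStepA]
        -- A's result is the map of x + pvY over [0, dx]; rewrite B the same way
        have hBfold := pv_foldl_append_map
          (fun x => (PySem.List.pyGet? arr (x + max 0 (-(PySem.Int.floordiv (dx - 2 * dy * x) (2 * dx))))).getD 0)
          (PySem.List.pyRange 1 k 1) [(PySem.List.pyGet? arr 0).getD 0]
        simp only [hBfold]
        have hmapeq : (PySem.List.pyRange 1 k 1).map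
            (fun x => (PySem.List.pyGet? arr (x + max 0 (-(PySem.Int.floordiv (dx - 2 * dy * x) (2 * dx))))).getD 0)
            = (PySem.List.pyRange 1 k 1).map (fun x => (PySem.List.pyGet? arr (x + pvY dx dy x)).getD 0) := by
          refine List.map_congr_left ?_
          intro x hx
          have hx1 : 1 ≤ x := ((PySem.List.mem_pyRange_one).mp hx).1
          have : pvY dx dy x = max 0 (-(PySem.Int.floordiv (dx - 2 * dy * x) (2 * dx))) := by
            unfold pvY
            rw [if_neg (by omega)]
          rw [this]
        rw [hmapeq]
        have hcons : PySem.List.pyRange 0 k 1 = (0:Int) :: PySem.List.pyRange 1 k 1 := by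
          have := PySem.List.pyRange_one_cons (a := 0) (b := k) (by omega)
          simpa using this
        have hfinal : (PySem.List.pyRange 0 dx 1).map (fun x => (PySem.List.pyGet? arr (x + pvY dx dy x)).getD 0)
              ++ [(PySem.List.pyGet? arr (dx + pvY dx dy dx)).getD 0]
            = (PySem.List.pyRange 0 k 1).map (fun x => (PySem.List.pyGet? arr (x + pvY dx dy x)).getD 0) := by
          have hk' : k = dx + 1 := by omega
          rw [hk', PySem.List.pyRange_one_succ_right (by omega), List.map_append]
          rfl
        rw [hfinal, hcons, List.map_cons]
        simp [pvY]
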